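-- pv_equiv track=rewrite | github.com/Moonlock/emojiCoding | interpreter.py | makeBracketMap
-- ===== SOURCE A (Python) =====
-- def makeBracketMap(code):
-- 	bracketMap = {}
-- 	openBrackets = []
--
-- 	for i, char in enumerate(code):
-- 		if char == '[':
-- 			openBrackets.append(i)
-- 		elif char == ']':
-- 			if not openBrackets:
-- 				return None
-- 			match = openBrackets.pop()
-- 			bracketMap[i] = match
-- 			bracketMap[match] = i
--
-- 	if openBrackets:
-- 		return None
--
-- 	return bracketMap
-- ===== SOURCE B (Python) =====
-- def makeBracketMap(code):
--     bracketMap = {}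
--     n = len(code)
--
--     def parse(i, start):
--         # Scan from i; start is the index of the '[' we are inside, or None at top level.
--         # Returns the index just past the matching closing bracket (or n at top level), or None on mismatch.
--         while i < n:
--             c = code[i]
--             if c == '[':
--                 j = parse(i + 1, i)
--                 if j is None:
--                     return None
--                 i = j
--             elif c == ']':
--                 if start is None:
--                     return None
--                 bracketMap[i] = start
--                 bracketMap[start] = i
--                 return i + 1
--             else:
--                 i += 1
--         return i if start is None else None
--
--     if parse(0, None) is None:
--         return None
--     return bracketMap
-- ===== Notes on version B (the rewrite author's own statement) =====
-- stated objective: alternative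
-- what changed: Replaced the explicit open-bracket stack with a recursive-descent parser over the nested bracket structure (the call stack plays the role of the index stack), resuming after each matched pair from the returned position.
import Mathlib
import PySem

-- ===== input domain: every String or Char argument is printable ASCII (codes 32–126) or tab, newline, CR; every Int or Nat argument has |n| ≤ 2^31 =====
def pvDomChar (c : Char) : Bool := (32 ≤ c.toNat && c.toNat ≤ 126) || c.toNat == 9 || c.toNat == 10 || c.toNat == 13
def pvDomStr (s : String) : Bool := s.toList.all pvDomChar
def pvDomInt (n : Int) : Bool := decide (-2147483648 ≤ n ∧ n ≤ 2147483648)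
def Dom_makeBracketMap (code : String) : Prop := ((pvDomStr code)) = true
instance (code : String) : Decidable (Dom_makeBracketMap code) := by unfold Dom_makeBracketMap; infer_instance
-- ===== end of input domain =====

-- B replaces A's explicit open-bracket stack by a recursive-descent parser over the nested
-- bracket structure (alternative decomposition, same cost); return values proved equal.

-- ===== PORT A =====
-- A's for-loop over enumerate(code) with the open-bracket stack and early returns.
def loopA (pairs : List (Int × Char)) (opens : List Int) (bm : PySem.Dict Int Int) :
    Option (PySem.Dict Int Int) :=
  match pairs with
  | [] => if opens = [] then some bm else none
  | (i, c) :: rest =>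
    if c = '[' then loopA rest (opens ++ [i]) bm
    else if c = ']' then
      if opens = [] then none
      else
        match PySem.List.pop? opens (-1) with
        | none => none
        | some (m, opens') => loopA rest opens' ((bm.insert i m).insert m i)
    else loopA rest opens bm

def makeBracketMap (code : String) : Option (List (Int × Int)) :=
  match loopA (PySem.List.enumerate code.toList 0) [] PySem.Dict.empty with
  | none => none
  | some bm => some bm.items

-- ===== PORT B =====
-- B's parse(i, start): recursion over the remaining characters (kept in sync with the index i);
-- `start` is the index of the enclosing '[' (none at top level); returns the remaining characters,
-- the index just past the matching closer and the updated map.  `fuel` (≥ number of remaining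
-- characters at every call) is only a totality guard.
def parseB (fuel : Nat) (cs : List Char) (i : Int) (start : Option Int)
    (bm : PySem.Dict Int Int) : Option (List Char × Int × PySem.Dict Int Int) :=
  match fuel, cs with
  | _, [] =>
    match start with
    | none => some ([], i, bm)
    | some _ => none
  | 0, _ :: _ => none
  | f + 1, c :: rest =>
    if c = '[' then
      match parseB f rest (i + 1) (some i) bm with
      | none => none
      | some (rest', j, bm') => parseB f rest' j start bm'
    else if c = ']' then
      match start with
      | none => none
      | some s => some (rest, i + 1, (bm.insert i s).insert s i)
    else parseB f rest (i + 1) start bm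

def makeBracketMap_alt (code : String) : Option (List (Int × Int)) :=
  match parseB code.toList.length code.toList 0 none PySem.Dict.empty with
  | none => none
  | some (_, _, bm) => some bm.items

-- ===== PRECONDITION & SPEC =====
def Spec_makeBracketMap (code : String) (out : Option (List (Int × Int))) : Prop := out = makeBracketMap_alt code
instance (code : String) (out : Option (List (Int × Int))) : Decidable (Spec_makeBracketMap code out) := by unfold Spec_makeBracketMap; infer_instance

-- ===== CLAIM (what is proved, stated in full; the proofs are below) =====
def Claim_equal_makeBracketMap : Prop := ∀ (code : String), Dom_makeBracketMap code → Spec_makeBracketMap code (makeBracketMap code)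

-- ===== LEMMAS AND PROOFS =====

-- A successful parse never returns more characters than it was given.
theorem parseB_length_le (f : Nat) :
    ∀ (cs : List Char) (i : Int) (start : Option Int) (bm : PySem.Dict Int Int)
      (r : List Char) (j : Int) (bm' : PySem.Dict Int Int),
      parseB f cs i start bm = some (r, j, bm') → r.length ≤ cs.length := by
  induction f with
  | zero =>
    intro cs i start bm r j bm' h
    cases cs with
    | nil =>
      cases start <;> simp [parseB] at h
      simp [h.1]
    | cons c rest => simp [parseB] at h
  | succ f ih =>
    intro cs i start bm r j bm' h
    cases cs with
    | nil =>
      cases start <;> simp [parseB] at h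
      simp [h.1]
    | cons c rest =>
      by_cases hc1 : c = '['
      · simp only [parseB, hc1, if_true] at h
        cases hin : parseB f rest (i + 1) (some i) bm with
        | none => rw [hin] at h; simp at h
        | some t =>
          obtain ⟨r1, j1, b1⟩ := t
          rw [hin] at h
          simp at h
          have h1 := ih rest (i + 1) (some i) bm r1 j1 b1 hin
          have h2 := ih r1 j1 start b1 r j bm' h
          simp
          omega
      · by_cases hc2 : c = ']'
        · simp only [parseB, hc2, if_true] at h
          cases start with
          | none => simp at h
          | some s =>
            simp at h
            obtain ⟨h1, _, _⟩ := h
            simp [← h1]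
        · simp only [parseB, hc1, hc2, reduceIte] at h
          have := ih rest (i + 1) start bm r j bm' h
          simp
          omega

-- Main simulation: A's stack loop equals B's recursive descent.
-- (a) top level (empty stack, start = none); (b) inside a bracket opened at s, with the
-- older opens L below it on A's stack (its top is the LAST element, so the stack is L ++ [s]).
theorem loopA_parseB (f : Nat) :
    (∀ (cs : List Char) (i : Int) (bm : PySem.Dict Int Int), cs.length ≤ f →
      loopA (PySem.List.enumerate cs i) [] bm =
        (parseB f cs i none bm).map (fun t => t.2.2)) ∧
    (∀ (cs : List Char) (i s : Int) (L : List Int) (bm : PySem.Dict Int Int), cs.length ≤ f →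
      loopA (PySem.List.enumerate cs i) (L ++ [s]) bm =
        match parseB f cs i (some s) bm with
        | none => none
        | some (r, j, b') => loopA (PySem.List.enumerate r j) L b') := by
  induction f with
  | zero =>
    constructor
    · intro cs i bm hlen
      have : cs = [] := List.length_eq_zero_iff.mp (Nat.le_zero.mp hlen)
      subst this
      simp [loopA, parseB, PySem.List.enumerate_nil]
    · intro cs i s L bm hlen
      have : cs = [] := List.length_eq_zero_iff.mp (Nat.le_zero.mp hlen)
      subst this
      simp [loopA, parseB, PySem.List.enumerate_nil]
  | succ f ih =>
    obtain ⟨iha, ihb⟩ := ih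
    constructor
    · intro cs i bm hlen
      cases cs with
      | nil => simp [loopA, parseB, PySem.List.enumerate_nil]
      | cons c rest =>
        simp only [List.length_cons, Nat.add_le_add_iff_right] at hlen
        rw [PySem.List.enumerate_cons]
        by_cases hc1 : c = '['
        · subst hc1
          simp only [loopA, parseB, if_true]
          rw [ihb rest (i + 1) i [] bm hlen]
          cases hin : parseB f rest (i + 1) (some i) bm with
          | none => simp
          | some t =>
            obtain ⟨r1, j1, b1⟩ := t
            simp only
            exact iha r1 j1 b1 (le_trans (parseB_length_le f rest (i + 1) (some i) bm r1 j1 b1 hin) hlen)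
        · by_cases hc2 : c = ']'
          · subst hc2
            simp [loopA, parseB, hc1]
          · simp only [loopA, parseB, hc1, hc2, reduceIte]
            exact iha rest (i + 1) bm hlen
    · intro cs i s L bm hlen
      cases cs with
      | nil => simp [loopA, parseB, PySem.List.enumerate_nil]
      | cons c rest =>
        simp only [List.length_cons, Nat.add_le_add_iff_right] at hlen
        rw [PySem.List.enumerate_cons]
        by_cases hc1 : c = '['
        · subst hc1
          simp only [loopA, parseB, if_true]
          rw [ihb rest (i + 1) i (L ++ [s]) bm hlen]
          cases hin : parseB f rest (i + 1) (some i) bm with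
          | none => simp
          | some t =>
            obtain ⟨r1, j1, b1⟩ := t
            simp only
            have hr1 : r1.length ≤ f :=
              le_trans (parseB_length_le f rest (i + 1) (some i) bm r1 j1 b1 hin) hlen
            rw [ihb r1 j1 s L b1 hr1]
        · by_cases hc2 : c = ']'
          · subst hc2
            simp only [loopA, parseB, hc1, reduceIte, if_true]
            have hne : L ++ [s] ≠ [] := by simp
            rw [if_neg hne, PySem.List.pop?_last L s]
          · simp only [loopA, parseB, hc1, hc2, reduceIte]
            exact ihb rest (i + 1) s L bm hlen

-- ===== VERDICT (by name: the statement is the Claim_ definition above) =====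
theorem makeBracketMap_spec : Claim_equal_makeBracketMap := by
  intro code _
  unfold Spec_makeBracketMap makeBracketMap makeBracketMap_alt
  rw [(loopA_parseB code.toList.length).1 code.toList 0 PySem.Dict.empty le_rfl]
  cases parseB code.toList.length code.toList 0 none PySem.Dict.empty with
  | none => rfl
  | some t => rfl
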